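-- pv_equiv track=rewrite | github.com/delfick/django-stubs | scripts/test_helpers/django_stubs_test_driver/definition.py | _parse_parametrized
-- ===== SOURCE A (Python) =====
-- from collections import defaultdict
-- from collections.abc import Iterator, Mapping, MutableMapping, MutableSequence, Sequence
--
-- def _parse_parametrized(params: Sequence[Mapping[str, object]]) -> Iterator[Mapping[str, object]]:
--     if not params:
--         yield {}
--         return
--
--     by_keys: MutableMapping[str, MutableSequence[Mapping[str, object]]] = defaultdict(list)
--     for _, param in enumerate(params):
--         keys = ", ".join(sorted(param))
--         if by_keys and keys not in by_keys:
--             raise ValueError(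
--                 "All parametrized entries must have same keys."
--                 f'First entry is {", ".join(sorted(list(by_keys)[0]))} but {keys} '
--                 "was spotted at {idx} position",
--             )
--
--         by_keys[keys].append({k: v for k, v in param.items() if not k.startswith("__")})
--
--     if len(by_keys) != 1:
--         # This should never happen and is a defensive repetition of the above error
--         raise ValueError("All parametrized entries must have the same keys")
--
--     for param_lists in by_keys.values():
--         yield from param_lists
-- ===== SOURCE B (Python) =====
-- def _parse_parametrized(params):
--     if not params:
--         yield {}
--         return
--
--     first_keys = ", ".join(sorted(params[0]))
--     for param in params:
--         keys = ", ".join(sorted(param))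
--         if keys != first_keys:
--             raise ValueError(
--                 "All parametrized entries must have same keys."
--                 f'First entry is {", ".join(sorted(first_keys))} but {keys} '
--                 "was spotted at {idx} position",
--             )
--
--     for param in params:
--         yield {k: v for k, v in param.items() if not k.startswith("__")}
-- ===== Notes on version B (the rewrite author's own statement) =====
-- stated objective: simpler
-- what changed: Replaces the defaultdict grouping with two plain passes: one loop validates each param's sorted-key string against the first entry's, then a second loop yields the filtered dicts in original order; no grouping map and no defensive second check are needed.
-- outside the precondition, e.g. on _parse_parametrized([{'a': 1}, {'b': 2}]): A raises ValueError, B raises ValueError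
import Mathlib
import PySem

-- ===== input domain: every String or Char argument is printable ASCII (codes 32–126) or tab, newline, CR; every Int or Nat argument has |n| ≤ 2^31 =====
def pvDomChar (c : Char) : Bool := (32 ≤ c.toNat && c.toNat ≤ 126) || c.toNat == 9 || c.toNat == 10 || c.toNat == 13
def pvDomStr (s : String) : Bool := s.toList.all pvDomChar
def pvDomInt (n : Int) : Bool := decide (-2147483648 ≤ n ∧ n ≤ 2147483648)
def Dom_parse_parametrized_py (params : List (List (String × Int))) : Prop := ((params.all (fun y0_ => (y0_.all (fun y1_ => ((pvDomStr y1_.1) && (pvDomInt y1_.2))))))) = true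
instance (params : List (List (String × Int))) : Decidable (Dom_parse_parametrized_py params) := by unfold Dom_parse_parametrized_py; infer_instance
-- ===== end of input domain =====

-- B replaces A's defaultdict grouping by two plain passes (validate all key strings, then emit
-- the filtered dicts in order); objective: simpler. Raising inputs (mismatched key sets) are outside Pre_.

-- shared expressions both Pythons contain verbatim:
-- keys = ", ".join(sorted(param))
def pvKeys (param : List (String × Int)) : List Char :=
  PySem.Chars.join [',', ' ']
    (PySem.List.sorted ((PySem.Dict.ofList param).keys.map String.toList) (fun s => s) false)

-- {k: v for k, v in param.items() if not k.startswith("__")}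
def pvFilt (param : List (String × Int)) : List (String × Int) :=
  ((PySem.Dict.ofList param).items).filter (fun kv => !(PySem.Str.startswith kv.1 "__"))

-- ===== PORT A =====
-- the for-loop over params building by_keys; 'none' models the raise
def pvLoopA (ps : List (List (String × Int)))
    (byKeys : PySem.Dict (List Char) (List (List (String × Int)))) :
    Option (PySem.Dict (List Char) (List (List (String × Int)))) :=
  match ps with
  | [] => some byKeys
  | p :: rest =>
    let keys := pvKeys p
    if byKeys.size ≠ 0 ∧ byKeys.contains keys = false then none
    else pvLoopA rest (byKeys.insert keys (byKeys.getD keys [] ++ [pvFilt p]))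

def parse_parametrized_py (params : List (List (String × Int))) : List (List (String × Int)) :=
  if params.isEmpty then [[]]
  else
    match pvLoopA params PySem.Dict.empty with
    | none => []  -- first raise, excluded by Pre_
    | some byKeys =>
      if byKeys.size ≠ 1 then []  -- defensive raise, excluded by Pre_
      else byKeys.values.flatten

-- ===== PORT B =====
def parse_parametrized_py_alt (params : List (List (String × Int))) : List (List (String × Int)) :=
  if params.isEmpty then [[]]
  else
    let firstKeys := pvKeys (params.headD [])
    -- validation pass; 'false' branch models the raise, excluded by Pre_
    if params.all (fun p => pvKeys p == firstKeys) then
      params.map pvFilt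
    else []

-- ===== PRECONDITION & SPEC =====
-- Pre_ excludes exactly the inputs on which A raises ValueError: some entry's sorted-key
-- string differs from the first entry's.
def Pre_parse_parametrized_py (params : List (List (String × Int))) : Prop :=
  ∀ p ∈ params, pvKeys p = pvKeys (params.headD [])
instance (params : List (List (String × Int))) : Decidable (Pre_parse_parametrized_py params) := by
  unfold Pre_parse_parametrized_py; infer_instance

def pvWitness_parse_parametrized_py : (List (List (String × Int))) :=
  [[("a", 1), ("__b", 2)], [("a", 3), ("__b", 4)]]

def Spec_parse_parametrized_py (params : List (List (String × Int))) (out : List (List (String × Int))) : Prop := out = parse_parametrized_py_alt params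
instance (params : List (List (String × Int))) (out : List (List (String × Int))) : Decidable (Spec_parse_parametrized_py params out) := by unfold Spec_parse_parametrized_py; infer_instance

-- ===== CLAIM (what is proved, stated in full; the proofs are below) =====
def Claim_equal_parse_parametrized_py : Prop := ∀ (params : List (List (String × Int))), Dom_parse_parametrized_py params → Pre_parse_parametrized_py params → Spec_parse_parametrized_py params (parse_parametrized_py params)

-- ===== LEMMAS AND PROOFS =====

-- A's loop on a singleton group: when every entry has key string k, it just appends.
theorem pvLoopA_singleton (k : List Char) (ps : List (List (String × Int)))
    (h : ∀ p ∈ ps, pvKeys p = k) (acc : List (List (String × Int))) :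
    pvLoopA ps (PySem.Dict.mk [(k, acc)]) =
      some (PySem.Dict.mk [(k, acc ++ ps.map pvFilt)]) := by
  induction ps generalizing acc with
  | nil => simp [pvLoopA]
  | cons p rest ih =>
    have hk : pvKeys p = k := h p (List.mem_cons_self ..)
    have hrest : ∀ q ∈ rest, pvKeys q = k := fun q hq => h q (List.mem_cons_of_mem _ hq)
    simp only [pvLoopA, hk]
    have hcon : (PySem.Dict.mk [(k, acc)]).contains k = true := by
      simp [PySem.Dict.contains]
    have hins : (PySem.Dict.mk [(k, acc)]).insert k
        ((PySem.Dict.mk [(k, acc)]).getD k [] ++ [pvFilt p])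
        = PySem.Dict.mk [(k, acc ++ [pvFilt p])] := by
      simp [PySem.Dict.insert, PySem.Dict.getD, PySem.Dict.get?, PySem.Dict.contains]
    rw [if_neg (by simp [hcon]), hins, ih hrest]
    simp

-- ===== VERDICT (by name: the statement is the Claim_ definition above) =====
theorem parse_parametrized_py_spec : Claim_equal_parse_parametrized_py := by
  intro params _hdom hpre
  unfold Spec_parse_parametrized_py parse_parametrized_py parse_parametrized_py_alt
  cases params with
  | nil => simp
  | cons p0 rest =>
    have hpre' : ∀ q ∈ rest, pvKeys q = pvKeys p0 := by
      intro q hq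
      simpa using hpre q (List.mem_cons_of_mem _ hq)
    have hall : (p0 :: rest).all (fun p => pvKeys p == pvKeys ((p0 :: rest).headD [])) = true := by
      simp only [List.all_eq_true]
      intro p hp
      simpa using hpre p hp
    simp only [List.isEmpty_cons, if_neg (by simp : ¬ ((false : Bool) = true))]
    rw [if_pos hall]
    -- reduce A's first iteration to a singleton dict, then apply the loop lemma
    have hstep : pvLoopA (p0 :: rest) PySem.Dict.empty =
        pvLoopA rest (PySem.Dict.mk [(pvKeys p0, [pvFilt p0])]) := by
      simp [pvLoopA, PySem.Dict.empty, PySem.Dict.insert, PySem.Dict.getD,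
        PySem.Dict.get?, PySem.Dict.contains, PySem.Dict.size]
    rw [hstep, pvLoopA_singleton (pvKeys p0) rest hpre' [pvFilt p0]]
    simp [PySem.Dict.size, PySem.Dict.values]
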